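-- pv_equiv track=rewrite | github.com/manwar/perlweeklychallenge-club | challenge-151/roger-bell-west/python/ch-2.py | plan
-- ===== SOURCE A (Python) =====
-- def plan(houses):
--   terminal=len(houses)-2
--   b=[[0]]
--   reward=0
--   while len(b) > 0:
--     c=b.pop()
--     if c[-1] >= terminal:
--       r=sum(houses[i] for i in c)
--       if r > reward:
--         reward=r
--     else:
--       for n in range(c[-1]+2,c[-1]+4):
--         if n >= len(houses):
--           break
--         j=c.copy()
--         j.append(n)
--         b.append(j)
--   return reward
-- ===== SOURCE B (Python) =====
-- def plan(houses):
--     # backward DP: best[i] = best sum of a +2/+3 path from house i to a terminal house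
--     n = len(houses)
--     best = []
--     for i in range(n - 1, -1, -1):
--         if i >= n - 2:
--             v = houses[i]
--         else:
--             opts = [best[1]]
--             if i + 3 < n:
--                 opts.append(best[2])
--             v = houses[i] + max(opts)
--         best.insert(0, v)
--     return max(0, best[0]) if best else 0
-- ===== Notes on version B (the rewrite author's own statement) =====
-- stated objective: faster
-- what changed: A enumerates every +2/+3 path with an explicit stack (exponential); B computes a linear backward DP best[i] = houses[i] + max(best[i+2], best[i+3]) and returns max(0, best[0]).
import Mathlib
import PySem

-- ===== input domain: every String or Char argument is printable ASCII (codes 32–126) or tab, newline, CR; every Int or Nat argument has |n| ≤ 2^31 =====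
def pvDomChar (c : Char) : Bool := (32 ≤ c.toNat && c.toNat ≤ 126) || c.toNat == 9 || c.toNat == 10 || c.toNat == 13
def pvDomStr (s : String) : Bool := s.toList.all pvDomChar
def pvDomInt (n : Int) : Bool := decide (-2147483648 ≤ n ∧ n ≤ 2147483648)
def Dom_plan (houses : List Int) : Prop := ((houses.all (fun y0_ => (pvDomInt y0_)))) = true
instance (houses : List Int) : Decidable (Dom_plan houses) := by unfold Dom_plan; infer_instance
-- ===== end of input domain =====

-- B replaces A's exponential stack enumeration of all +2/+3 paths by a linear backward DP (objective: faster, asymptotic).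

-- ===== PORT A =====
-- Port note: Python's paths and the stack grow/pop at the END; here both are kept
-- head-first (cons = append, pattern-match head = pop), so c[-1] is the head; Python's
-- locals L = c[-1] and r are written inline. Python pushes child L+2 then L+3 and pops
-- L+3 first; head-first that is (L+3)::c before (L+2)::c. houses[i] in the terminal sum
-- is ported as getD i 0: every generated index is < len(houses) except for houses = [],
-- where Python raises IndexError (excluded by Pre_plan).
def planRun (houses : List Int) (b : List (List Nat)) (reward : Int) : Int :=
  match b with
  | [] => reward
  | c :: rest =>
    if ((c.headD 0 : Int)) ≥ (houses.length : Int) - 2 then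
      planRun houses rest
        (if (c.map (fun i => houses.getD i 0)).sum > reward
         then (c.map (fun i => houses.getD i 0)).sum else reward)
    else
      -- for n in range(L+2, L+4): break when n ≥ len(houses); L+2 < len always holds here
      if c.headD 0 + 3 ≥ houses.length then
        planRun houses (((c.headD 0 + 2) :: c) :: rest) reward
      else
        planRun houses (((c.headD 0 + 3) :: c) :: ((c.headD 0 + 2) :: c) :: rest) reward
termination_by (b.map (fun c => 2 ^ (houses.length + 1 - c.headD 0))).sum
decreasing_by
  · simp only [List.map_cons, List.sum_cons]
    have : 0 < 2 ^ (houses.length + 1 - c.headD 0) := Nat.two_pow_pos _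
    omega
  · rename_i h1 h2
    simp only [List.map_cons, List.sum_cons, List.headD_cons]
    have : 2 ^ (houses.length + 1 - (c.headD 0 + 2)) < 2 ^ (houses.length + 1 - c.headD 0) :=
      Nat.pow_lt_pow_right (by omega) (by omega)
    omega
  · rename_i h1 h2
    simp only [List.map_cons, List.sum_cons, List.headD_cons]
    have he : houses.length + 1 - c.headD 0 = (houses.length - 1 - c.headD 0) + 2 := by omega
    have he2 : houses.length + 1 - (c.headD 0 + 2) = houses.length - 1 - c.headD 0 := by omega
    have he3 : houses.length + 1 - (c.headD 0 + 3) = houses.length - 2 - c.headD 0 := by omega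
    have hp : 2 ^ (houses.length - 2 - c.headD 0) ≤ 2 ^ (houses.length - 1 - c.headD 0) :=
      Nat.pow_le_pow_right (by omega) (by omega)
    rw [he, he2, he3, pow_add]
    have : 0 < 2 ^ (houses.length - 1 - c.headD 0) := Nat.two_pow_pos _
    omega

def plan (houses : List Int) : Int := planRun houses [[0]] 0

-- ===== PORT B =====
-- best is the DP list for indices i, i+1, …, n-1 (built back to front by insert(0, v));
-- the loop variable i runs n-1, n-2, …, 0, here the countdown argument is i+1; the local v
-- (with its opts = [best[1]] / opts.append(best[2]) / max(opts)) is written inline.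
def planLoop (houses : List Int) (i : Nat) (best : List Int) : List Int :=
  match i with
  | 0 => best
  | i + 1 =>
    planLoop houses i
      ((if houses.length ≤ i + 2 then houses.getD i 0
        else houses.getD i 0 +
          (if i + 3 < houses.length then max (best.getD 1 0) (best.getD 2 0)
           else best.getD 1 0)) :: best)

def plan_alt (houses : List Int) : Int :=
  match planLoop houses houses.length [] with
  | [] => 0
  | x :: _ => max 0 x

-- ===== PRECONDITION & SPEC =====
-- Pre_plan excludes only the empty list, on which Python A raises IndexError (B happens to return 0 there).
def Pre_plan (houses : List Int) : Prop := houses ≠ []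
instance (houses : List Int) : Decidable (Pre_plan houses) := by unfold Pre_plan; infer_instance
def pvWitness_plan : List Int := [1, 2, 3]

def Spec_plan (houses : List Int) (out : Int) : Prop := out = plan_alt houses
instance (houses : List Int) (out : Int) : Decidable (Spec_plan houses out) := by unfold Spec_plan; infer_instance

-- ===== CLAIM (what is proved, stated in full; the proofs are below) =====
def Claim_equal_plan : Prop := ∀ (houses : List Int), Dom_plan houses → Pre_plan houses → Spec_plan houses (plan houses)

-- ===== LEMMAS AND PROOFS =====

-- F houses L = best attainable sum of a +2/+3 path from house L to a terminal house.
def F (houses : List Int) (L : Nat) : Int :=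
  if (L : Int) ≥ (houses.length : Int) - 2 then houses.getD L 0
  else houses.getD L 0 +
    (if L + 3 ≥ houses.length then F houses (L + 2)
     else max (F houses (L + 2)) (F houses (L + 3)))
termination_by houses.length - L
decreasing_by all_goals omega

-- value of a (head-first) partial path on A's stack: committed sum + best continuation
def pathVal (houses : List Int) (c : List Nat) : Int :=
  (c.tail.map (fun i => houses.getD i 0)).sum + F houses (c.headD 0)

theorem planRun_eq_aux (houses : List Int) :
    ∀ N b reward, (b.map (fun c => 2 ^ (houses.length + 1 - c.headD 0))).sum ≤ N →
      (∀ c ∈ b, c ≠ []) →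
      planRun houses b reward = b.foldl (fun acc c => max acc (pathVal houses c)) reward := by
  intro N
  induction N using Nat.strong_induction_on with
  | _ N ih =>
    intro b reward hN hb
    match b with
    | [] => rw [planRun]; rfl
    | c :: rest =>
      obtain ⟨h, t, rfl⟩ : ∃ h t, c = h :: t := by
        rcases c with _ | ⟨h, t⟩
        · exact absurd rfl (hb [] List.mem_cons_self)
        · exact ⟨h, t, rfl⟩
      have hbr : ∀ d ∈ rest, d ≠ [] := fun d hd => hb d (List.mem_cons_of_mem _ hd)
      have hpos : 0 < 2 ^ (houses.length + 1 - h) := Nat.two_pow_pos _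
      simp only [List.map_cons, List.sum_cons, List.headD_cons] at hN
      rw [planRun]
      simp only [List.headD_cons]
      by_cases h1 : ((h : Int)) ≥ (houses.length : Int) - 2
      · rw [if_pos h1]
        rw [ih ((rest.map (fun c => 2 ^ (houses.length + 1 - c.headD 0))).sum) (by omega)
            rest _ le_rfl hbr]
        simp only [List.foldl_cons]
        congr 1
        have hF : F houses h = houses.getD h 0 := by rw [F, if_pos h1]
        simp only [pathVal, List.headD_cons, List.tail_cons, hF, List.map_cons, List.sum_cons]
        rw [max_def]
        split_ifs <;> omega
      · rw [if_neg h1]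
        have hF0 : ¬ ((h : Int) ≥ (houses.length : Int) - 2) := h1
        by_cases h2 : h + 3 ≥ houses.length
        · rw [if_pos h2]
          have hlt : 2 ^ (houses.length + 1 - (h + 2)) < 2 ^ (houses.length + 1 - h) :=
            Nat.pow_lt_pow_right (by omega) (by omega)
          rw [ih ((((h+2) :: h :: t) :: rest).map
                (fun c => 2 ^ (houses.length + 1 - c.headD 0))).sum
              (by simp only [List.map_cons, List.sum_cons, List.headD_cons]; omega)
              _ _ le_rfl (by
                intro d hd
                rcases List.mem_cons.mp hd with rfl | hd
                · simp
                · exact hbr d hd)]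
          simp only [List.foldl_cons]
          congr 2
          have hF : F houses h = houses.getD h 0 + F houses (h + 2) := by
            rw [F, if_neg hF0, if_pos h2]
          simp only [pathVal, List.headD_cons, List.tail_cons, List.map_cons, List.sum_cons, hF]
          ring
        · rw [if_neg h2]
          have hL : h + 3 < houses.length := by omega
          have he : houses.length + 1 - h = (houses.length - 1 - h) + 2 := by omega
          have he2 : houses.length + 1 - (h + 2) = houses.length - 1 - h := by omega
          have he3 : houses.length + 1 - (h + 3) = houses.length - 2 - h := by omega
          have hp : 2 ^ (houses.length - 2 - h) ≤ 2 ^ (houses.length - 1 - h) :=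
            Nat.pow_le_pow_right (by omega) (by omega)
          have hpos2 : 0 < 2 ^ (houses.length - 1 - h) := Nat.two_pow_pos _
          rw [ih ((((h+3) :: h :: t) :: ((h+2) :: h :: t) :: rest).map
                (fun c => 2 ^ (houses.length + 1 - c.headD 0))).sum
              (by
                simp only [List.map_cons, List.sum_cons, List.headD_cons]
                rw [he2, he3]
                rw [he, pow_add] at hN
                omega)
              _ _ le_rfl (by
                intro d hd
                rcases List.mem_cons.mp hd with rfl | hd
                · simp
                · rcases List.mem_cons.mp hd with rfl | hd
                  · simp
                  · exact hbr d hd)]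
          simp only [List.foldl_cons]
          congr 1
          have hF : F houses h = houses.getD h 0 + max (F houses (h + 2)) (F houses (h + 3)) := by
            rw [F, if_neg hF0, if_neg h2]
          simp only [pathVal, List.headD_cons, List.tail_cons, List.map_cons, List.sum_cons, hF]
          rw [max_def, max_def, max_def, max_def]
          split_ifs <;> omega

theorem plan_eq_F (houses : List Int) : plan houses = max 0 (F houses 0) := by
  rw [plan, planRun_eq_aux houses _ [[0]] 0 le_rfl (by simp)]
  simp [pathVal]

theorem planLoop_eq (houses : List Int) :
    ∀ i, i ≤ houses.length →
      planLoop houses i ((List.range' i (houses.length - i)).map (F houses)) =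
        (List.range' 0 houses.length).map (F houses) := by
  intro i
  induction i with
  | zero => intro _; simp [planLoop]
  | succ i ih =>
    intro hi
    have hrange : List.range' i (houses.length - i) = i :: List.range' (i+1) (houses.length - (i+1)) := by
      have h' : houses.length - i = (houses.length - (i+1)) + 1 := by omega
      rw [h', List.range'_succ]
    have hv : (if houses.length ≤ i + 2 then houses.getD i 0
             else houses.getD i 0 +
               (if i + 3 < houses.length then
                  max (((List.range' (i+1) (houses.length - (i+1))).map (F houses)).getD 1 0)
                      (((List.range' (i+1) (houses.length - (i+1))).map (F houses)).getD 2 0)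
                else ((List.range' (i+1) (houses.length - (i+1))).map (F houses)).getD 1 0))
        = F houses i := by
      by_cases hterm : houses.length ≤ i + 2
      · rw [if_pos hterm, F,
          if_pos (show ((i : Nat) : Int) ≥ (houses.length : Int) - 2 by omega)]
      · rw [if_neg hterm, F,
          if_neg (show ¬ (((i : Nat) : Int) ≥ (houses.length : Int) - 2) by omega)]
        by_cases hbrk : i + 3 < houses.length
        · rw [if_pos hbrk, if_neg (show ¬ (i + 3 ≥ houses.length) by omega)]
          have h4 : houses.length - (i+1) = (houses.length - (i+4)) + 3 := by omega
          rw [h4]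
          simp only [List.range']
          simp
        · rw [if_neg hbrk, if_pos (show i + 3 ≥ houses.length by omega)]
          have h2' : houses.length - (i+1) = 2 := by omega
          rw [h2']
          simp [List.range']
    rw [planLoop, hv]
    have hc : F houses i :: (List.range' (i+1) (houses.length - (i+1))).map (F houses)
        = (List.range' i (houses.length - i)).map (F houses) := by
      rw [hrange]; simp
    rw [hc]
    exact ih (by omega)

theorem plan_alt_eq_F (houses : List Int) (h : houses ≠ []) :
    plan_alt houses = max 0 (F houses 0) := by
  have h0 := planLoop_eq houses houses.length le_rfl
  simp only [Nat.sub_self, List.range'_zero, List.map_nil] at h0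
  rw [plan_alt, h0]
  have hn : houses.length ≠ 0 := by simpa using h
  have hr : List.range' 0 houses.length = 0 :: List.range' 1 (houses.length - 1) := by
    have h' : houses.length = (houses.length - 1) + 1 := by omega
    conv_lhs => rw [h']
    rw [List.range'_succ]
  rw [hr]
  simp

-- ===== VERDICT (by name: the statement is the Claim_ definition above) =====
theorem plan_spec : Claim_equal_plan := by
  intro houses _ hpre
  unfold Spec_plan
  rw [plan_eq_F, plan_alt_eq_F houses hpre]
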